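-- pv_equiv track=rewrite | github.com/inclusionAI/AWorld | aworld-cli/src/aworld_cli/console.py | _reduce_segments
-- ===== SOURCE A (Python) =====
-- def _reduce_segments(
--
--     segments: list[str],
--     max_width: int | None,
--     priority_labels: set[str] | None = None,
-- ) -> list[str]:
--     if max_width is None:
--         return list(segments)
--     kept = list(segments)
--     priority_labels = priority_labels or set()
--     while len(kept) > 1 and len(" | ".join(kept)) > max_width:
--         if len(kept) <= 2:
--             kept.pop()
--             continue
--         removable_index = None
--         for index in range(len(kept) - 1, -1, -1):
--             segment = kept[index]
--             label = segment.split(":", 1)[0].strip().lower()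
--             if label not in priority_labels:
--                 removable_index = index
--                 break
--         if removable_index is None:
--             removable_index = len(kept) - 1
--         kept.pop(removable_index)
--     return kept
-- ===== SOURCE B (Python) =====
-- def _reduce_segments(
--     segments: list[str],
--     max_width: int | None,
--     priority_labels: set[str] | None = None,
-- ) -> list[str]:
--     if max_width is None:
--         return list(segments)
--     prio = priority_labels or set()
--     total = sum(len(s) for s in segments) + 3 * (len(segments) - 1)
--     count = len(segments)
--     result = []
--     # Phase 1: one right-to-left pass dropping non-priority segments while too wide.
--     for seg in reversed(segments):
--         label = seg.split(":", 1)[0].strip().lower()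
--         if total > max_width and count > 2 and label not in prio:
--             total -= len(seg) + 3
--             count -= 1
--         else:
--             result.append(seg)
--     result.reverse()
--     # Phase 2: still too wide -> pop from the end.
--     while count > 1 and total > max_width:
--         seg = result.pop()
--         total -= len(seg) + 3
--         count -= 1
--     return result
-- ===== Notes on version B (the rewrite author's own statement) =====
-- stated objective: faster
-- what changed: A re-joins the whole list and rescans it from the right on every iteration of its while-loop; B makes a single right-to-left pass that drops non-priority segments while maintaining a running joined width and remaining count incrementally, then pops from the end while still too wide.
import Mathlib
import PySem

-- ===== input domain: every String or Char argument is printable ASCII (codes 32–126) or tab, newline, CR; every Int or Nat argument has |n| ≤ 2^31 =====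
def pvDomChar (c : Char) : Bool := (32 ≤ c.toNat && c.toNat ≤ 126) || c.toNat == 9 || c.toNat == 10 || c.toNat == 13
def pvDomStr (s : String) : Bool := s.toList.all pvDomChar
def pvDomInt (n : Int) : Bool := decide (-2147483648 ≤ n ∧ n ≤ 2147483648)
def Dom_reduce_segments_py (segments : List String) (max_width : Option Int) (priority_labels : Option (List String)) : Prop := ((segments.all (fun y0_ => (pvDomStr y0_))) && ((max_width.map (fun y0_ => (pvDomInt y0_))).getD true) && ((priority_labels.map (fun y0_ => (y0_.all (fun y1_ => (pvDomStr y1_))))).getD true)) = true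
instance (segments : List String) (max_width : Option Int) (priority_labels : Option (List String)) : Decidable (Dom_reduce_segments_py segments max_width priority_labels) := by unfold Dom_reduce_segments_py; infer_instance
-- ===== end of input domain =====

-- B replaces A's re-join + rescan while-loop by one right-to-left pass with a running
-- joined width (objective: faster; a timing run measures the actual speed-up).

-- ===== PORT A =====
-- label = segment.split(":", 1)[0].strip().lower()   (shared by both Pythons verbatim)
def pvLabel (s : String) : String :=
  PySem.Str.lower (PySem.Str.strip (((PySem.Str.splitMax? s ":" 1).getD [s]).headD s))

-- len(" | ".join(kept))
def pvJoinLen (kept : List String) : Int := PySem.Str.len (PySem.Str.join " | " kept)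

-- the 'for index in range(len(kept)-1, -1, -1): … break' search for removable_index
def pvFindA (kept : List String) (prio : List String) : List Int → Option Int
  | [] => none
  | i :: rest =>
    match PySem.List.pyGet? kept i with
    | some seg => if pvLabel seg ∈ prio then pvFindA kept prio rest else some i
    | none => none   -- unreachable: every index from range(len(kept)-1,-1,-1) is in range

-- the while-loop of A; one recursive call per popped element
def pvLoopA (maxw : Int) (prio : List String) (kept : List String) : List String :=
  if h : 1 < kept.length ∧ maxw < pvJoinLen kept then
    if kept.length ≤ 2 then pvLoopA maxw prio kept.dropLast
    else
      -- removable_index: the rightmost non-priority index, else len(kept)-1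
      match hp : PySem.List.pop? kept ((pvFindA kept prio (PySem.List.pyRange ((kept.length : Int) - 1) (-1) (-1))).getD ((kept.length : Int) - 1)) with
      | some r => pvLoopA maxw prio r.2
      | none => kept
  else kept
termination_by kept.length
decreasing_by
  · simp only [List.length_dropLast]; omega
  · have := PySem.List.length_of_pop?_eq_some kept hp; omega

def reduce_segments_py (segments : List String) (max_width : Option Int) (priority_labels : Option (List String)) : List String :=
  match max_width with
  | none => segments
  | some maxw => pvLoopA maxw (priority_labels.getD []) segments

-- ===== PORT B =====
-- total = sum(len(s) for s in segments) + 3 * (len(segments) - 1)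
def pvJ (xs : List String) : Int := (xs.map PySem.Str.len).sum + 3 * ((xs.length : Int) - 1)

-- the 'for seg in reversed(segments)' pass; acc plays the role of result (cons = append+final reverse)
def pvPhase1 (maxw : Int) (prio : List String) : List String → List String → Int → Int → List String × Int × Int
  | [], acc, total, count => (acc, total, count)
  | seg :: rest, acc, total, count =>
    if maxw < total ∧ 2 < count ∧ pvLabel seg ∉ prio then
      pvPhase1 maxw prio rest acc (total - (PySem.Str.len seg + 3)) (count - 1)
    else
      pvPhase1 maxw prio rest (seg :: acc) total count

-- the 'while count > 1 and total > max_width: result.pop()' loop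
def pvPhase2 (maxw : Int) (r : List String) (total count : Int) : List String :=
  if 1 < count ∧ maxw < total then
    match h : r.getLast? with
    | some seg => pvPhase2 maxw r.dropLast (total - (PySem.Str.len seg + 3)) (count - 1)
    | none => r
  else r
termination_by r.length
decreasing_by
  have : r ≠ [] := by intro hn; rw [hn] at h; simp at h
  simp only [List.length_dropLast]
  exact Nat.sub_lt (List.length_pos_iff.mpr this) Nat.one_pos

def reduce_segments_py_alt (segments : List String) (max_width : Option Int) (priority_labels : Option (List String)) : List String :=
  match max_width with
  | none => segments
  | some maxw =>
    let prio := priority_labels.getD []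
    match pvPhase1 maxw prio segments.reverse [] (pvJ segments) (segments.length : Int) with
    | (r, t, c) => pvPhase2 maxw r t c

-- ===== PRECONDITION & SPEC =====
def Spec_reduce_segments_py (segments : List String) (max_width : Option Int) (priority_labels : Option (List String)) (out : List String) : Prop := out = reduce_segments_py_alt segments max_width priority_labels
instance (segments : List String) (max_width : Option Int) (priority_labels : Option (List String)) (out : List String) : Decidable (Spec_reduce_segments_py segments max_width priority_labels out) := by unfold Spec_reduce_segments_py; infer_instance

-- ===== CLAIM (what is proved, stated in full; the proofs are below) =====
def Claim_equal_reduce_segments_py : Prop := ∀ (segments : List String) (max_width : Option Int) (priority_labels : Option (List String)), Dom_reduce_segments_py segments max_width priority_labels → Spec_reduce_segments_py segments max_width priority_labels (reduce_segments_py segments max_width priority_labels)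

-- ===== LEMMAS AND PROOFS =====

-- joined width of a nonempty list, on the char level
theorem pvJoinChars_len (ps : List (List Char)) (hne : ps ≠ []) :
    (PySem.Chars.join (" | ".toList) ps).length = (ps.map List.length).sum + 3 * (ps.length - 1) := by
  induction ps with
  | nil => exact absurd rfl hne
  | cons p rest ih =>
    cases rest with
    | nil => simp [PySem.Chars.join_singleton]
    | cons q rest' =>
      rw [PySem.Chars.join_cons_cons]
      have h := ih (by simp)
      have hsep : (" | ".toList).length = 3 := rfl
      simp only [List.length_append, List.map_cons, List.sum_cons, List.length_cons] at *
      omega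

theorem pvJoinLen_eq (xs : List String) (hne : xs ≠ []) : pvJoinLen xs = pvJ xs := by
  have hb : (PySem.Str.join " | " xs).toList = PySem.Chars.join " | ".toList (xs.map String.toList) := by
    simp [PySem.Str.join]
  have hmne : xs.map String.toList ≠ [] := by simpa using hne
  have h1 : ∀ l : List String, (l.map PySem.Str.len).sum = (((l.map String.toList).map List.length).sum : Int) := by
    intro l
    induction l with
    | nil => simp
    | cons a t ih => simp [PySem.Str.len_eq, ih]
  have hpos : 1 ≤ xs.length := List.length_pos_iff.mpr hne
  unfold pvJoinLen pvJ
  rw [PySem.Str.len_eq, hb, pvJoinChars_len _ hmne, h1]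
  have hlm : (xs.map String.toList).length = xs.length := List.length_map ..
  rw [hlm, Nat.cast_add, Nat.cast_mul, Nat.cast_sub hpos]
  push_cast
  ring

theorem pvJ_snoc (ys : List String) (z : String) :
    pvJ (ys ++ [z]) = pvJ ys + (PySem.Str.len z + 3) := by
  unfold pvJ
  simp only [List.map_append, List.sum_append, List.length_append, List.map_cons, List.map_nil,
    List.sum_cons, List.sum_nil, List.length_cons, List.length_nil]
  push_cast
  ring

theorem pvJ_mid (pre suf : List String) (x : String) :
    pvJ (pre ++ x :: suf) = pvJ (pre ++ suf) + (PySem.Str.len x + 3) := by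
  unfold pvJ
  simp only [List.map_append, List.sum_append, List.length_append, List.map_cons,
    List.sum_cons, List.length_cons]
  push_cast
  ring

-- phase 1 removes nothing once the width fits or only two segments remain
theorem pvPhase1_stop (maxw : Int) (prio : List String) (rev acc : List String) (total count : Int)
    (h : ¬ maxw < total ∨ ¬ 2 < count) :
    pvPhase1 maxw prio rev acc total count = (rev.reverse ++ acc, total, count) := by
  induction rev generalizing acc with
  | nil => simp [pvPhase1]
  | cons seg rest ih =>
    rw [pvPhase1, if_neg (by tauto)]
    rw [ih (seg :: acc)]
    simp

-- phase 1 keeps a block of priority segments untouched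
theorem pvPhase1_prio (maxw : Int) (prio : List String) (zs rest acc : List String) (total count : Int)
    (h : ∀ s ∈ zs, pvLabel s ∈ prio) :
    pvPhase1 maxw prio (zs ++ rest) acc total count = pvPhase1 maxw prio rest (zs.reverse ++ acc) total count := by
  induction zs generalizing acc with
  | nil => simp
  | cons z zs ih =>
    have hz : pvLabel z ∈ prio := h z (by simp)
    rw [List.cons_append, pvPhase1, if_neg (by tauto)]
    rw [ih (z :: acc) (fun s hs => h s (by simp [hs]))]
    simp

theorem pvPhase1_all (maxw : Int) (prio : List String) (kept : List String) (total count : Int)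
    (h : ∀ s ∈ kept, pvLabel s ∈ prio) :
    pvPhase1 maxw prio kept.reverse [] total count = (kept, total, count) := by
  have := pvPhase1_prio maxw prio kept.reverse [] [] total count
    (fun s hs => h s (List.mem_reverse.mp hs))
  simpa [pvPhase1] using this

-- the index search only reads the inspected positions
theorem pvFindA_congr (kept ys prio : List String) (is : List Int)
    (h : ∀ i ∈ is, PySem.List.pyGet? kept i = PySem.List.pyGet? ys i) :
    pvFindA kept prio is = pvFindA ys prio is := by
  induction is with
  | nil => rfl
  | cons i rest ih =>
    rw [pvFindA, pvFindA, h i (by simp)]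
    have ih' := ih (fun j hj => h j (by simp [hj]))
    cases PySem.List.pyGet? ys i with
    | none => rfl
    | some seg =>
      by_cases hs : pvLabel seg ∈ prio <;> simp [hs, ih']

theorem pvFindA_none (prio kept : List String) (h : ∀ s ∈ kept, pvLabel s ∈ prio) :
    pvFindA kept prio (PySem.List.pyRange ((kept.length : Int) - 1) (-1) (-1)) = none := by
  induction kept using List.reverseRecOn with
  | nil => rw [PySem.List.pyRange_neg_one_eq_nil (by simp)]; rfl
  | append_singleton ys z ih =>
    have hl : ((ys ++ [z]).length : Int) - 1 = (ys.length : Int) := by simp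
    rw [hl, PySem.List.pyRange_neg_one_cons (by omega)]
    simp only [pvFindA, PySem.List.pyGet?_append_length ys [] z]
    rw [if_pos (h z (by simp))]
    rw [pvFindA_congr (ys ++ [z]) ys prio _ ?_]
    · exact ih (fun s hs => h s (by simp [hs]))
    · intro i hi
      rw [PySem.List.mem_pyRange_neg_one] at hi
      have h0 : (0:Int) ≤ i := by omega
      rw [PySem.List.pyGet?_of_nonneg _ h0, PySem.List.pyGet?_of_nonneg _ h0,
        List.getElem?_append_left (by omega)]

theorem pvFindA_some (prio suf : List String) (hs : ∀ s ∈ suf, pvLabel s ∈ prio)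
    (pre : List String) (x : String) (hx : pvLabel x ∉ prio) :
    pvFindA (pre ++ x :: suf) prio
      (PySem.List.pyRange (((pre ++ x :: suf).length : Int) - 1) (-1) (-1)) = some (pre.length : Int) := by
  induction suf using List.reverseRecOn with
  | nil =>
    have hl : ((pre ++ [x]).length : Int) - 1 = (pre.length : Int) := by simp
    rw [hl, PySem.List.pyRange_neg_one_cons (by omega)]
    simp only [pvFindA, PySem.List.pyGet?_append_length pre [] x]
    rw [if_neg hx]
  | append_singleton ys z ih =>
    have hassoc : pre ++ x :: (ys ++ [z]) = (pre ++ x :: ys) ++ [z] := by simp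
    rw [hassoc]
    have hl : (((pre ++ x :: ys) ++ [z]).length : Int) - 1 = ((pre ++ x :: ys).length : Int) := by
      simp
      omega
    rw [hl, PySem.List.pyRange_neg_one_cons (by omega)]
    simp only [pvFindA, PySem.List.pyGet?_append_length (pre ++ x :: ys) [] z]
    rw [if_pos (hs z (by simp))]
    rw [pvFindA_congr ((pre ++ x :: ys) ++ [z]) (pre ++ x :: ys) prio _ ?_]
    · exact ih (fun s hmem => hs s (by simp [hmem]))
    · intro i hi
      rw [PySem.List.mem_pyRange_neg_one] at hi
      have h0 : (0:Int) ≤ i := by omega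
      rw [PySem.List.pyGet?_of_nonneg _ h0, PySem.List.pyGet?_of_nonneg _ h0,
        List.getElem?_append_left (by omega)]

theorem pvEraseIdx_mid (pre suf : List String) (x : String) :
    (pre ++ x :: suf).eraseIdx pre.length = pre ++ suf := by
  induction pre with
  | nil => simp
  | cons a pre ih => simpa using ih

-- every non-priority segment or a ≤2-segment list: A's loop only ever pops the last element
theorem pvLoopA_tail (maxw : Int) (prio : List String) (kept : List String)
    (h : (∀ s ∈ kept, pvLabel s ∈ prio) ∨ kept.length ≤ 2) :
    pvLoopA maxw prio kept = pvPhase2 maxw kept (pvJ kept) (kept.length : Int) := by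
  generalize hn : kept.length = n
  induction n using Nat.strong_induction_on generalizing kept with
  | _ n ih =>
  subst hn
  by_cases hc : 1 < kept.length ∧ maxw < pvJ kept
  · have hne : kept ≠ [] := by intro he; rw [he] at hc; simp at hc
    rcases List.eq_nil_or_concat kept with h0 | ⟨ys, z, hk⟩
    · exact absurd h0 hne
    rw [List.concat_eq_append] at hk
    subst hk
    have hJ : pvJ (ys ++ [z]) - (PySem.Str.len z + 3) = pvJ ys := by
      rw [pvJ_snoc]; ring
    have hcnt : ((ys ++ [z]).length : Int) - 1 = (ys.length : Int) := by simp
    have htail : pvLoopA maxw prio ys = pvPhase2 maxw ys (pvJ ys) (ys.length : Int) := by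
      refine ih ys.length (by simp) ys ?_ rfl
      rcases h with hall | h2
      · exact Or.inl fun s hs => hall s (by simp [hs])
      · right; simp at h2 ⊢; omega
    have hphase : pvPhase2 maxw (ys ++ [z]) (pvJ (ys ++ [z])) ((ys ++ [z]).length : Int)
        = pvPhase2 maxw ys (pvJ ys) (ys.length : Int) := by
      conv_lhs => rw [pvPhase2]
      rw [if_pos ⟨by exact_mod_cast hc.1, hc.2⟩]
      split
      next seg heq =>
        rw [List.getLast?_concat] at heq
        obtain rfl : z = seg := by injection heq
        rw [List.dropLast_concat, hJ, hcnt]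
      next heq => rw [List.getLast?_concat] at heq; simp at heq
    have hloop : pvLoopA maxw prio (ys ++ [z]) = pvLoopA maxw prio ys := by
      conv_lhs => rw [pvLoopA]
      rw [dif_pos ⟨hc.1, by rw [pvJoinLen_eq _ hne]; exact hc.2⟩]
      by_cases h2 : (ys ++ [z]).length ≤ 2
      · rw [if_pos h2, List.dropLast_concat]
      · rw [if_neg h2]
        have hall : ∀ s ∈ ys ++ [z], pvLabel s ∈ prio := by
          rcases h with hall | hlen
          · exact hall
          · exact absurd hlen h2
        split
        next r heq =>
          rw [pvFindA_none prio _ hall, Option.getD_none,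
            show ((ys ++ [z]).length : Int) - 1 = ((ys.length : Nat) : Int) by simp,
            PySem.List.pop?_natCast _ ys.length (by simp)] at heq
          obtain rfl : ((ys ++ [z])[ys.length], (ys ++ [z]).eraseIdx ys.length) = r := by
            injection heq
          show pvLoopA maxw prio ((ys ++ [z]).eraseIdx ys.length) = _
          rw [show (ys ++ [z]).eraseIdx ys.length = ys from by simpa using pvEraseIdx_mid ys [] z]
        next heq =>
          rw [pvFindA_none prio _ hall, Option.getD_none,
            show ((ys ++ [z]).length : Int) - 1 = ((ys.length : Nat) : Int) by simp,
            PySem.List.pop?_natCast _ ys.length (by simp)] at heq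
          simp at heq
    rw [hloop, hphase]
    exact htail
  · rw [pvLoopA, pvPhase2, dif_neg ?hA, if_neg ?hB]
    case hA =>
      intro hx
      have hne : kept ≠ [] := by intro he; rw [he] at hx; simp at hx
      rw [pvJoinLen_eq kept hne] at hx
      exact hc hx
    case hB =>
      intro hx
      exact hc ⟨by exact_mod_cast hx.1, hx.2⟩

-- either everything is priority, or there is a rightmost non-priority segment
theorem pvDichotomy (prio : List String) (l : List String) :
    (∀ s ∈ l, pvLabel s ∈ prio) ∨
    ∃ pre x suf, l = pre ++ x :: suf ∧ pvLabel x ∉ prio ∧ (∀ s ∈ suf, pvLabel s ∈ prio) := by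
  induction l using List.reverseRecOn with
  | nil => exact Or.inl (by simp)
  | append_singleton ys z ih =>
    by_cases hz : pvLabel z ∈ prio
    · rcases ih with hall | ⟨pre, x, suf, rfl, hx, hsuf⟩
      · refine Or.inl ?_
        intro s hsm
        rcases List.mem_append.mp hsm with h | h
        · exact hall s h
        · simp at h; subst h; exact hz
      · refine Or.inr ⟨pre, x, suf ++ [z], by simp, hx, ?_⟩
        intro s hsm
        rcases List.mem_append.mp hsm with h | h
        · exact hsuf s h
        · simp at h; subst h; exact hz
    · exact Or.inr ⟨ys, z, [], by simp, hz, by simp⟩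

theorem pvMain (maxw : Int) (prio : List String) (kept : List String) :
    pvLoopA maxw prio kept =
      (match pvPhase1 maxw prio kept.reverse [] (pvJ kept) (kept.length : Int) with
       | (r, t, c) => pvPhase2 maxw r t c) := by
  generalize hn : kept.length = n
  induction n using Nat.strong_induction_on generalizing kept with
  | _ n ih =>
  subst hn
  by_cases hW : maxw < pvJ kept
  · by_cases h2 : kept.length ≤ 2
    · rw [pvPhase1_stop _ _ _ _ _ _ (Or.inr (by omega))]
      simp only [List.reverse_reverse, List.append_nil]
      exact pvLoopA_tail maxw prio kept (Or.inr h2)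
    · rcases pvDichotomy prio kept with hall | ⟨pre, x, suf, hk, hx, hsuf⟩
      · rw [pvPhase1_all _ _ _ _ _ hall]
        exact pvLoopA_tail maxw prio kept (Or.inl hall)
      · subst hk
        have hne : (pre ++ x :: suf) ≠ [] := by simp
        have h3 : 2 < (pre ++ x :: suf).length := by omega
        -- LHS: A pops the rightmost non-priority segment
        have hL : pvLoopA maxw prio (pre ++ x :: suf) = pvLoopA maxw prio (pre ++ suf) := by
          conv_lhs => rw [pvLoopA]
          rw [dif_pos ⟨by omega, by rw [pvJoinLen_eq _ hne]; exact hW⟩, if_neg h2]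
          split
          next r heq =>
            rw [pvFindA_some prio suf hsuf pre x hx, Option.getD_some,
              PySem.List.pop?_natCast _ pre.length (by simp)] at heq
            obtain rfl : ((pre ++ x :: suf)[pre.length], (pre ++ x :: suf).eraseIdx pre.length) = r := by
              injection heq
            show pvLoopA maxw prio ((pre ++ x :: suf).eraseIdx pre.length) = _
            rw [pvEraseIdx_mid]
          next heq =>
            rw [pvFindA_some prio suf hsuf pre x hx, Option.getD_some,
              PySem.List.pop?_natCast _ pre.length (by simp)] at heq
            simp at heq
        -- RHS: phase 1 skips x, with the same running width and count
        have hcnt : ((pre ++ suf).length : Int) = ((pre ++ x :: suf).length : Int) - 1 := by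
          simp; omega
        have hJ : pvJ (pre ++ suf) = pvJ (pre ++ x :: suf) - (PySem.Str.len x + 3) := by
          rw [pvJ_mid]; ring
        have hR : pvPhase1 maxw prio (pre ++ x :: suf).reverse [] (pvJ (pre ++ x :: suf)) ((pre ++ x :: suf).length : Int)
            = pvPhase1 maxw prio (pre ++ suf).reverse [] (pvJ (pre ++ suf)) ((pre ++ suf).length : Int) := by
          have hrev1 : (pre ++ x :: suf).reverse = suf.reverse ++ x :: pre.reverse := by simp
          have hrev2 : (pre ++ suf).reverse = suf.reverse ++ pre.reverse := by simp
          rw [hrev1, hrev2,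
            pvPhase1_prio _ _ _ _ _ _ _ (fun s hsm => hsuf s (List.mem_reverse.mp hsm)),
            pvPhase1_prio _ _ _ _ _ _ _ (fun s hsm => hsuf s (List.mem_reverse.mp hsm))]
          simp only [List.reverse_reverse, List.append_nil]
          conv_lhs => rw [pvPhase1]
          rw [if_pos ⟨hW, by exact_mod_cast h3, hx⟩]
          rw [hcnt, hJ]
        rw [hL, hR]
        refine ih (pre ++ suf).length (by simp) (pre ++ suf) rfl
  · rw [pvPhase1_stop _ _ _ _ _ _ (Or.inl hW)]
    simp only [List.reverse_reverse, List.append_nil]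
    by_cases h2 : kept.length ≤ 2
    · exact pvLoopA_tail maxw prio kept (Or.inr h2)
    · have hne : kept ≠ [] := by intro he; rw [he] at h2; simp at h2
      rw [pvLoopA, pvPhase2,
        dif_neg (by rw [pvJoinLen_eq _ hne]; exact fun hxx => hW hxx.2),
        if_neg (fun hxx => hW hxx.2)]

-- ===== VERDICT (by name: the statement is the Claim_ definition above) =====
theorem reduce_segments_py_spec : Claim_equal_reduce_segments_py := by
  intro segments max_width priority_labels _
  unfold Spec_reduce_segments_py reduce_segments_py reduce_segments_py_alt
  cases max_width with
  | none => rfl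
  | some maxw => exact pvMain maxw (priority_labels.getD []) segments
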